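-- pv_equiv track=rewrite | github.com/Gurstel/blockblast_solver | solver.py | all_rotations
-- ===== SOURCE A (Python) =====
-- def normalize_shape(cells):
--     min_r = min(r for r, _ in cells)
--     min_c = min(c for _, c in cells)
--     return sorted([(r - min_r, c - min_c) for r, c in cells])
--
-- def rotate_shape(cells):
--     # 90 deg rotation (r, c) -> (c, -r), then normalize
--     return normalize_shape([(c, -r) for r, c in cells])
--
-- def all_rotations(cells):
--     base = normalize_shape(cells)
--     shapes = [base]
--     cur = base
--     for _ in range(3):
--         cur = rotate_shape(cur)
--         if cur not in shapes:
--             shapes.append(cur)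
--     return shapes
-- ===== SOURCE B (Python) =====
-- def normalize_shape(cells):
--     min_r = min(r for r, _ in cells)
--     min_c = min(c for _, c in cells)
--     return sorted([(r - min_r, c - min_c) for r, c in cells])
--
-- def all_rotations(cells):
--     # Each rotation is computed directly from the input cells by its closed-form
--     # coordinate map (identity, (c,-r), (-r,-c), (-c,r)); no iterated rotation.
--     shapes = [
--         normalize_shape([(r, c) for r, c in cells]),
--         normalize_shape([(c, -r) for r, c in cells]),
--         normalize_shape([(-r, -c) for r, c in cells]),
--         normalize_shape([(-c, r) for r, c in cells]),
--     ]
--     # first-occurrence dedup by prefix membership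
--     return [s for i, s in enumerate(shapes) if s not in shapes[:i]]
-- ===== Notes on version B (the rewrite author's own statement) =====
-- stated objective: alternative
-- what changed: B drops rotate_shape and the iterated-rotation loop entirely: each of the four rotations is obtained directly from the raw input cells by its own closed-form coordinate map ((r,c), (c,-r), (-r,-c), (-c,r)), each normalized independently, and duplicates are removed by a prefix-membership comprehension over the fixed 4-list instead of a growing accumulator; correctness rests on normalize(rot(normalize(x))) = normalize(rot(x)).
import Mathlib
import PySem

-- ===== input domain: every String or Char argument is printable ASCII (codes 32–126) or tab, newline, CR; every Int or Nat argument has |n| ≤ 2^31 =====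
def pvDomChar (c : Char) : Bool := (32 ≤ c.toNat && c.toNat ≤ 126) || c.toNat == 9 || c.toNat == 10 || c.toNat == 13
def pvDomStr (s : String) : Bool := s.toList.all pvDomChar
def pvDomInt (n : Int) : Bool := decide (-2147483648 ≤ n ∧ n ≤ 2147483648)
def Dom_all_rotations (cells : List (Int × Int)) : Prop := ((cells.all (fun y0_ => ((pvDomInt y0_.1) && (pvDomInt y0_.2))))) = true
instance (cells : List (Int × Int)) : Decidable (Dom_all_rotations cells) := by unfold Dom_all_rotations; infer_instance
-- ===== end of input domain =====

-- B replaces the iterated-rotation loop by four independent closed-form coordinate maps applied to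
-- the raw input (each normalized once) plus a prefix-membership dedup comprehension; alternative
-- decomposition, same cost; proved equal on all non-empty cell lists (Python raises on an empty one).


-- ===== PORT A =====
-- shared module helper (both Pythons define it); Python's min raises on [], excluded by Pre_
def normalize_shape (cells : List (Int × Int)) : List (Int × Int) :=
  match PySem.List.min? (cells.map Prod.fst) (fun x => x),
        PySem.List.min? (cells.map Prod.snd) (fun x => x) with
  | some min_r, some min_c =>
      PySem.List.sorted2 (cells.map (fun p => (p.1 - min_r, p.2 - min_c))) Prod.fst Prod.snd
  | _, _ => []   -- unreachable under Pre_

def rotate_shape (cells : List (Int × Int)) : List (Int × Int) :=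
  normalize_shape (cells.map (fun p => (p.2, -p.1)))

def all_rotations (cells : List (Int × Int)) : List (List (Int × Int)) :=
  let base := normalize_shape cells
  let st := (PySem.List.pyRange 0 3 1).foldl
      (fun (st : List (List (Int × Int)) × List (Int × Int)) _ =>
        let cur := rotate_shape st.2
        (if cur ∈ st.1 then st.1 else st.1 ++ [cur], cur))
      ([base], base)
  st.1

-- ===== PORT B =====
def all_rotations_alt (cells : List (Int × Int)) : List (List (Int × Int)) :=
  let shapes := [normalize_shape (cells.map (fun p => (p.1, p.2))),
                 normalize_shape (cells.map (fun p => (p.2, -p.1))),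
                 normalize_shape (cells.map (fun p => (-p.1, -p.2))),
                 normalize_shape (cells.map (fun p => (-p.2, p.1)))]
  ((PySem.List.enumerate shapes).filter
      (fun is => decide (is.2 ∉ PySem.List.slice shapes none (some is.1)))).map Prod.snd

-- ===== PRECONDITION & SPEC =====
-- Python's min raises ValueError on an empty list (in both A and B), so Pre_ excludes exactly the empty list.
def Pre_all_rotations (cells : List (Int × Int)) : Prop := cells ≠ []
instance (cells : List (Int × Int)) : Decidable (Pre_all_rotations cells) := by unfold Pre_all_rotations; infer_instance
def pvWitness_all_rotations : (List (Int × Int)) := [((0 : Int), (0 : Int))]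
def Spec_all_rotations (cells : List (Int × Int)) (out : List (List (Int × Int))) : Prop := out = all_rotations_alt cells
instance (cells : List (Int × Int)) (out : List (List (Int × Int))) : Decidable (Spec_all_rotations cells out) := by unfold Spec_all_rotations; infer_instance

-- ===== CLAIM (what is proved, stated in full; the proofs are below) =====
def Claim_equal_all_rotations : Prop := ∀ (cells : List (Int × Int)), Dom_all_rotations cells → Pre_all_rotations cells → Spec_all_rotations cells (all_rotations cells)

-- ===== LEMMAS AND PROOFS =====

theorem sorted2_eq_sorted_lex (xs : List (Int × Int)) :
    PySem.List.sorted2 xs Prod.fst Prod.snd false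
      = PySem.List.sorted xs (fun p => (toLex p : Int ×ₗ Int)) false := by
  show List.foldl _ [] xs = List.foldl _ [] xs
  have hb : (fun (a b : Int × Int) => decide (a.1 < b.1) || !decide (b.1 < a.1) && decide (a.2 < b.2))
      = fun a b => decide ((toLex a : Int ×ₗ Int) < toLex b) := by
    funext a b
    rcases a with ⟨a1, a2⟩; rcases b with ⟨b1, b2⟩
    by_cases h : a1 < b1 <;> by_cases h2 : b1 < a1 <;>
      simp [Prod.Lex.lt_iff, h, h2] <;> omega
  simp only [hb]
  simp

theorem min?_id_perm {xs ys : List Int} (h : xs.Perm ys) {m m' : Int}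
    (hm : PySem.List.min? xs (fun x => x) = some m)
    (hm' : PySem.List.min? ys (fun x => x) = some m') : m = m' := by
  have h1 : m ∈ xs := PySem.List.min?_mem hm
  have h2 : m' ∈ ys := PySem.List.min?_mem hm'
  have h3 := PySem.List.min?_isMin hm m' (h.mem_iff.mpr h2)
  have h4 := PySem.List.min?_isMin hm' m (h.mem_iff.mp h1)
  omega

theorem normalize_perm {xs ys : List (Int × Int)} (h : xs.Perm ys) :
    normalize_shape xs = normalize_shape ys := by
  rcases eq_or_ne xs [] with rfl | hne
  · have : ys = [] := h.nil_eq.symm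
    subst this; rfl
  · have hyne : ys ≠ [] := fun hy => hne (by subst hy; exact h.eq_nil)
    obtain ⟨mr, hmr⟩ : ∃ m, PySem.List.min? (xs.map Prod.fst) (fun x => x) = some m := by
      cases hh : PySem.List.min? (xs.map Prod.fst) (fun x => x) with
      | none => exact absurd (((PySem.List.min?_eq_none_iff _ _).mp hh)) (by simp [hne])
      | some m => exact ⟨m, rfl⟩
    obtain ⟨mc, hmc⟩ : ∃ m, PySem.List.min? (xs.map Prod.snd) (fun x => x) = some m := by
      cases hh : PySem.List.min? (xs.map Prod.snd) (fun x => x) with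
      | none => exact absurd (((PySem.List.min?_eq_none_iff _ _).mp hh)) (by simp [hne])
      | some m => exact ⟨m, rfl⟩
    obtain ⟨mr', hmr'⟩ : ∃ m, PySem.List.min? (ys.map Prod.fst) (fun x => x) = some m := by
      cases hh : PySem.List.min? (ys.map Prod.fst) (fun x => x) with
      | none => exact absurd (((PySem.List.min?_eq_none_iff _ _).mp hh)) (by simp [hyne])
      | some m => exact ⟨m, rfl⟩
    obtain ⟨mc', hmc'⟩ : ∃ m, PySem.List.min? (ys.map Prod.snd) (fun x => x) = some m := by
      cases hh : PySem.List.min? (ys.map Prod.snd) (fun x => x) with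
      | none => exact absurd (((PySem.List.min?_eq_none_iff _ _).mp hh)) (by simp [hyne])
      | some m => exact ⟨m, rfl⟩
    have er : mr = mr' := min?_id_perm (h.map Prod.fst) hmr hmr'
    have ec : mc = mc' := min?_id_perm (h.map Prod.snd) hmc hmc'
    unfold normalize_shape
    rw [hmr, hmc, hmr', hmc', ← er, ← ec]
    simp only []
    rw [sorted2_eq_sorted_lex, sorted2_eq_sorted_lex]
    exact PySem.List.sorted_eq_sorted_of_perm _ _ _ (toLex.injective)
      (h.map (fun p => (p.1 - mr, p.2 - mc)))

theorem foldl_min_add (t : List Int) (x a : Int) :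
    (t.map (· + a)).foldl min (x + a) = t.foldl min x + a := by
  induction t generalizing x with
  | nil => rfl
  | cons y t ih => simpa [min_add_add_right] using ih (min x y)

theorem min?_id_map_add (xs : List Int) (a : Int) :
    PySem.List.min? (xs.map (· + a)) (fun x => x)
      = (PySem.List.min? xs (fun x => x)).map (· + a) := by
  cases xs with
  | nil => rfl
  | cons x t =>
      simp [PySem.List.min?_id_cons, foldl_min_add]

theorem normalize_translate (l : List (Int × Int)) (a b : Int) :
    normalize_shape (l.map (fun p => (p.1 + a, p.2 + b))) = normalize_shape l := by
  rcases eq_or_ne l [] with rfl | hne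
  · rfl
  · obtain ⟨mr, hmr⟩ : ∃ m, PySem.List.min? (l.map Prod.fst) (fun x => x) = some m := by
      cases hh : PySem.List.min? (l.map Prod.fst) (fun x => x) with
      | none => exact absurd ((PySem.List.min?_eq_none_iff _ _).mp hh) (by simp [hne])
      | some m => exact ⟨m, rfl⟩
    obtain ⟨mc, hmc⟩ : ∃ m, PySem.List.min? (l.map Prod.snd) (fun x => x) = some m := by
      cases hh : PySem.List.min? (l.map Prod.snd) (fun x => x) with
      | none => exact absurd ((PySem.List.min?_eq_none_iff _ _).mp hh) (by simp [hne])
      | some m => exact ⟨m, rfl⟩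
    have hf : (l.map (fun p => (p.1 + a, p.2 + b))).map Prod.fst = (l.map Prod.fst).map (· + a) := by
      simp [List.map_map]
    have hs : (l.map (fun p => (p.1 + a, p.2 + b))).map Prod.snd = (l.map Prod.snd).map (· + b) := by
      simp [List.map_map]
    have hmr2 : PySem.List.min? ((l.map (fun p => (p.1 + a, p.2 + b))).map Prod.fst) (fun x => x) = some (mr + a) := by
      rw [hf, min?_id_map_add, hmr]; rfl
    have hmc2 : PySem.List.min? ((l.map (fun p => (p.1 + a, p.2 + b))).map Prod.snd) (fun x => x) = some (mc + b) := by
      rw [hs, min?_id_map_add, hmc]; rfl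
    unfold normalize_shape
    rw [hmr, hmc, hmr2, hmc2]
    have : (l.map (fun p => (p.1 + a, p.2 + b))).map (fun p => (p.1 - (mr + a), p.2 - (mc + b)))
        = l.map (fun p => (p.1 - mr, p.2 - mc)) := by
      simp [List.map_map]
    simp only [this]


theorem rotate_normalize (cells : List (Int × Int)) (h : cells ≠ []) :
    rotate_shape (normalize_shape cells)
      = normalize_shape (cells.map (fun p => (p.2, -p.1))) := by
  unfold rotate_shape
  obtain ⟨mr, hmr⟩ : ∃ m, PySem.List.min? (cells.map Prod.fst) (fun x => x) = some m := by
    cases hh : PySem.List.min? (cells.map Prod.fst) (fun x => x) with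
    | none => exact absurd ((PySem.List.min?_eq_none_iff _ _).mp hh) (by simp [h])
    | some m => exact ⟨m, rfl⟩
  obtain ⟨mc, hmc⟩ : ∃ m, PySem.List.min? (cells.map Prod.snd) (fun x => x) = some m := by
    cases hh : PySem.List.min? (cells.map Prod.snd) (fun x => x) with
    | none => exact absurd ((PySem.List.min?_eq_none_iff _ _).mp hh) (by simp [h])
    | some m => exact ⟨m, rfl⟩
  have hn : normalize_shape cells
      = PySem.List.sorted2 (cells.map (fun p => (p.1 - mr, p.2 - mc))) Prod.fst Prod.snd := by
    unfold normalize_shape; rw [hmr, hmc]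
  -- the sorted list is a permutation of the unsorted one; map preserves perm; normalize ignores perm
  have hperm : ((normalize_shape cells).map (fun p => (p.2, -p.1))).Perm
      ((cells.map (fun p => (p.1 - mr, p.2 - mc))).map (fun p => (p.2, -p.1))) := by
    rw [hn]
    exact (PySem.List.sorted2_perm _ _ _ _).map _
  rw [normalize_perm hperm]
  have : (cells.map (fun p => (p.1 - mr, p.2 - mc))).map (fun p => (p.2, -p.1))
      = (cells.map (fun p => (p.2, -p.1))).map (fun p => (p.1 + (-mc), p.2 + mr)) := by
    simp [List.map_map]
    intro a b _
    omega
  rw [this, normalize_translate]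

theorem map_rot_rot (cells : List (Int × Int)) :
    (cells.map (fun p => (p.2, -p.1))).map (fun p : Int × Int => (p.2, -p.1))
      = cells.map (fun p => (-p.1, -p.2)) := by
  simp [List.map_map]

theorem map_rot_rot2 (cells : List (Int × Int)) :
    (cells.map (fun p => (-p.1, -p.2))).map (fun p : Int × Int => (p.2, -p.1))
      = cells.map (fun p => (-p.2, p.1)) := by
  simp [List.map_map]

theorem dedup4 (a b c d : List (Int × Int)) :
    (let s1 := if b ∈ [a] then [a] else [a] ++ [b];
     let s2 := if c ∈ s1 then s1 else s1 ++ [c];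
     if d ∈ s2 then s2 else s2 ++ [d])
      = ((PySem.List.enumerate [a, b, c, d]).filter
          (fun is => decide (is.2 ∉ PySem.List.slice [a, b, c, d] none (some is.1)))).map Prod.snd := by
  simp only [PySem.List.enumerate_cons, PySem.List.enumerate_nil, List.filter]
  norm_num [PySem.List.slice_to]
  by_cases hba : b = a <;> by_cases hca : c = a <;> by_cases hcb : c = b <;>
    by_cases hda : d = a <;> by_cases hdb : d = b <;> by_cases hdc : d = c <;>
    simp_all

-- ===== VERDICT (by name: the statement is the Claim_ definition above) =====
theorem all_rotations_spec : Claim_equal_all_rotations := by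
  intro cells _ hpre
  unfold Spec_all_rotations all_rotations all_rotations_alt
  have hid : cells.map (fun p : Int × Int => (p.1, p.2)) = cells := by simp
  have hpre' : cells ≠ [] := hpre
  have hne1 : cells.map (fun p : Int × Int => (p.2, -p.1)) ≠ [] := by simp [hpre']
  have hne2 : cells.map (fun p : Int × Int => (-p.1, -p.2)) ≠ [] := by simp [hpre']
  have hr1 : rotate_shape (normalize_shape cells)
      = normalize_shape (cells.map (fun p => (p.2, -p.1))) := rotate_normalize cells hpre
  have hr2 : rotate_shape (normalize_shape (cells.map (fun p => (p.2, -p.1))))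
      = normalize_shape (cells.map (fun p => (-p.1, -p.2))) := by
    rw [rotate_normalize _ hne1, map_rot_rot]
  have hr3 : rotate_shape (normalize_shape (cells.map (fun p => (-p.1, -p.2))))
      = normalize_shape (cells.map (fun p => (-p.2, p.1))) := by
    rw [rotate_normalize _ hne2, map_rot_rot2]
  have hrange : PySem.List.pyRange 0 3 1 = [0, 1, 2] := by decide
  rw [hrange, hid]
  simp only [List.foldl_cons, List.foldl_nil]
  rw [hr1, hr2, hr3]
  exact dedup4 _ _ _ _
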